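-- pv_equiv track=rewrite | github.com/Amitreddy14/GEN-CLIP-CVAE | preprocess.py | check_naturey
-- ===== SOURCE A (Python) =====
-- small_buzzwords = ["cow", "sheep"]
--
-- large_buzzwords = ["cow", "sheep", "mountain", "hill", "countryside", "grass", "forest", "nature",
--                  "farm", "alpacca", "horse", "landscape", "fence"]
--
-- def check_naturey(captions: list[str], is_small: bool):
--     """Returns true if a caption for this image has one of our buzz words, false otherwise"""
--     buzzwords = small_buzzwords if is_small else large_buzzwords
--
--     def match(word):
--         for capt in captions:
--             if word in capt.lower():
--                 return True
--         return False
--     truth_map = [match(word) for word in buzzwords]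
--     return any(truth_map)
-- ===== SOURCE B (Python) =====
-- small_buzzwords = ["cow", "sheep"]
--
-- large_buzzwords = ["cow", "sheep", "mountain", "hill", "countryside", "grass", "forest", "nature",
--                  "farm", "alpacca", "horse", "landscape", "fence"]
--
-- def check_naturey(captions: list[str], is_small: bool):
--     """Returns true if a caption for this image has one of our buzz words, false otherwise"""
--     buzzwords = small_buzzwords if is_small else large_buzzwords
--     # first-character dispatch table: only buzzwords starting with the current
--     # character are tried at each position, via an anchored startswith test
--     index = {}
--     for w in buzzwords:
--         index[w[0]] = index.get(w[0], []) + [w]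
--     for capt in captions:
--         t = capt.lower()
--         for i, ch in enumerate(t):
--             for w in index.get(ch, []):
--                 if t.startswith(w, i):
--                     return True
--     return False
-- ===== Notes on version B (the rewrite author's own statement) =====
-- stated objective: alternative
-- what changed: Replaces A's per-buzzword repeated full scans of all captions (truth_map) by a first-character dispatch dict built once over the buzzwords plus a single anchored left-to-right position scan per lowered caption (startswith at each position, trying only words whose first letter matches), short-circuiting on the first hit.
import Mathlib
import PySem

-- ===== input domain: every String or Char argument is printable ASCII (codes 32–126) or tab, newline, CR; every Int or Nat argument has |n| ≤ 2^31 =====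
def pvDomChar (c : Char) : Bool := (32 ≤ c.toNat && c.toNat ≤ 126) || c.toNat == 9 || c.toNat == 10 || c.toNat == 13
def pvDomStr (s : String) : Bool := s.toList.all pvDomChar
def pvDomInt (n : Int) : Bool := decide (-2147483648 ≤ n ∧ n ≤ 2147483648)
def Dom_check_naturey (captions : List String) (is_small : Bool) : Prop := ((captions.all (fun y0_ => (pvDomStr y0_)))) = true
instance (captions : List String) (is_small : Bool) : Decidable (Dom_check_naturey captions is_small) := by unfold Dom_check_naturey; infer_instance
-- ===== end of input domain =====

-- B replaces A's per-buzzword repeated caption scans by a first-character dispatch table and one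
-- anchored left-to-right position scan per caption (objective: alternative algorithm/data structure).

-- ===== PORT A =====
-- module constants
def small_buzzwords : List String := ["cow", "sheep"]
def large_buzzwords : List String := ["cow", "sheep", "mountain", "hill", "countryside", "grass", "forest", "nature",
  "farm", "alpacca", "horse", "landscape", "fence"]

-- A: inner helper 'match' scans all captions for one word
def check_naturey_match (captions : List String) (word : String) : Bool :=
  captions.any (fun capt => PySem.Str.isIn word (PySem.Str.lower capt))

def check_naturey (captions : List String) (is_small : Bool) : Bool :=
  let buzzwords := if is_small then small_buzzwords else large_buzzwords
  let truth_map := buzzwords.map (fun word => check_naturey_match captions word)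
  truth_map.any id

-- ===== PORT B =====
-- B: first-character dispatch table: index[w[0]] = index.get(w[0], []) + [w]
-- (w[0] is ported as headD ' '; every buzzword is a nonempty literal, so this is exact)
def bz_index (buzzwords : List String) : PySem.Dict Char (List String) :=
  buzzwords.foldl (fun d w => d.modify (w.toList.headD ' ') [] (· ++ [w])) PySem.Dict.empty

-- B: per caption, scan positions left to right; at position i with char ch, try only the
-- buzzwords starting with ch, anchored there. 't.startswith(w, i)' with 0 ≤ i is exactly
-- 'w.toList is a prefix of t.drop i' (hand port, exact since enumerate indices are ≥ 0).
def bz_scan (idx : PySem.Dict Char (List String)) (t : List Char) : Bool :=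
  (PySem.List.enumerate t).any (fun p =>
    (idx.getD p.2 []).any (fun w => PySem.Chars.startswith (t.drop p.1.toNat) w.toList))

def check_naturey_alt (captions : List String) (is_small : Bool) : Bool :=
  let buzzwords := if is_small then small_buzzwords else large_buzzwords
  let idx := bz_index buzzwords
  captions.any (fun capt => bz_scan idx (PySem.Str.lower capt).toList)

-- ===== PRECONDITION & SPEC =====
def Spec_check_naturey (captions : List String) (is_small : Bool) (out : Bool) : Prop := out = check_naturey_alt captions is_small
instance (captions : List String) (is_small : Bool) (out : Bool) : Decidable (Spec_check_naturey captions is_small out) := by unfold Spec_check_naturey; infer_instance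

-- ===== CLAIM (what is proved, stated in full; the proofs are below) =====
def Claim_equal_check_naturey : Prop := ∀ (captions : List String) (is_small : Bool), Dom_check_naturey captions is_small → Spec_check_naturey captions is_small (check_naturey captions is_small)

-- ===== LEMMAS AND PROOFS =====

-- the dispatch table groups the words by first character
theorem getD_bz_index (ws : List String) (c : Char) :
    (bz_index ws).getD c [] = ws.filter (fun w => w.toList.headD ' ' == c) := by
  unfold bz_index
  have h := PySem.Dict.getD_foldl_modify_append
    (l := ws.map (fun w => (w.toList.headD ' ', w))) (d := PySem.Dict.empty) (c := c)
  rw [List.foldl_map] at h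
  simp only [h, PySem.Dict.getD_empty, List.nil_append, List.filter_map, List.map_map]
  simp [Function.comp_def]

-- enumerate-any is an indexed existential
theorem any_enumerate_iff (t : List Char) (f : Int → Char → Bool) (s : Int) :
    ((PySem.List.enumerate t s).any (fun p => f p.1 p.2) = true)
      ↔ ∃ (j : Nat), ∃ (h : j < t.length), f (s + j) t[j] = true := by
  induction t generalizing s with
  | nil => simp [PySem.List.enumerate_nil]
  | cons x xs ih =>
    rw [PySem.List.enumerate_cons]
    simp only [List.any_cons, Bool.or_eq_true, ih (s + 1)]
    constructor
    · rintro (h | ⟨j, hj, hf⟩)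
      · exact ⟨0, by simp, by simpa using h⟩
      · exact ⟨j + 1, by simpa using hj, by simpa [add_assoc, add_comm, add_left_comm] using hf⟩
    · rintro ⟨j, hj, hf⟩
      cases j with
      | zero => exact Or.inl (by simpa using hf)
      | succ j => exact Or.inr ⟨j, by simpa using hj, by simpa [add_assoc, add_comm, add_left_comm] using hf⟩

-- per lowered caption, the anchored dispatch scan finds exactly the words occurring as substrings
theorem bz_scan_eq_any_isIn (ws : List String) (hw : ∀ w ∈ ws, w.toList ≠ []) (t : List Char) :
    bz_scan (bz_index ws) t = ws.any (fun w => PySem.Chars.isIn w.toList t) := by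
  rw [Bool.eq_iff_iff]
  unfold bz_scan
  rw [any_enumerate_iff t (fun i ch => ((bz_index ws).getD ch []).any (fun w => PySem.Chars.startswith (t.drop i.toNat) w.toList)) 0]
  simp only [zero_add, Int.toNat_natCast, getD_bz_index, List.any_eq_true, List.mem_filter,
    beq_iff_eq, PySem.Chars.startswith_iff, ← PySem.Chars.exists_prefix_drop_iff_isIn]
  constructor
  · rintro ⟨j, hj, w, ⟨hmem, _⟩, hpre⟩
    exact ⟨w, hmem, j, hpre⟩
  · rintro ⟨w, hmem, j, hpre⟩
    obtain ⟨c, cs, hwl⟩ : ∃ c cs, w.toList = c :: cs := by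
      cases h : w.toList with
      | nil => exact absurd h (hw w hmem)
      | cons c cs => exact ⟨c, cs, rfl⟩
    have hpre2 := hpre
    obtain ⟨u, hu⟩ := hpre2
    have hjlen : j < t.length := by
      by_contra hge
      rw [List.drop_eq_nil_of_le (by omega)] at hu
      simp [hwl] at hu
    refine ⟨j, hjlen, w, ⟨hmem, ?_⟩, hpre⟩
    have : t.drop j = c :: (cs ++ u) := by rw [← hu, hwl]; simp
    have hget : t[j] = c := by
      have hh : t[j]? = some c := by rw [← List.head?_drop, this]; rfl
      simpa [List.getElem?_eq_getElem hjlen] using hh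
    simp [hwl, hget]

-- swapping the two quantifier layers of A: ∃ word, ∃ caption ↔ ∃ caption, ∃ word
theorem any_swap (ws cs : List String) (p : String → String → Bool) :
    (ws.map (fun w => cs.any (fun c => p w c))).any id
      = cs.any (fun c => ws.any (fun w => p w c)) := by
  rw [Bool.eq_iff_iff]
  simp only [List.any_map, List.any_eq_true, Function.comp_apply, id]
  constructor
  · rintro ⟨w, hw, c, hc, hp⟩; exact ⟨c, hc, w, hw, hp⟩
  · rintro ⟨c, hc, w, hw, hp⟩; exact ⟨w, hw, c, hc, hp⟩

-- ===== VERDICT (by name: the statement is the Claim_ definition above) =====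
theorem check_naturey_spec : Claim_equal_check_naturey := by
  intro captions is_small _
  unfold Spec_check_naturey
  cases is_small <;>
    simp only [check_naturey, check_naturey_alt, check_naturey_match, Bool.false_eq_true,
      if_true, if_false] <;>
    simp only [bz_scan_eq_any_isIn small_buzzwords (by decide),
      bz_scan_eq_any_isIn large_buzzwords (by decide)] <;>
    rw [any_swap] <;>
    simp only [PySem.Str.isIn_eq]
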